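-- pv_equiv track=rewrite | github.com/sureshkhaniya/formal_languages_project | task1.py | is_in_language_L
-- ===== SOURCE A (Python) =====
-- def is_in_language_L(string):
--     count_a = 0
--     count_b = 0
--     seen_b = False   # flag to check if we've started counting b's
--
--     for ch in string:
--         if ch == "a":
--             if seen_b:
--                 return False
--             count_a += 1
--         elif ch == "b":
--             seen_b = True
--             count_b += 1
--         else:
--             return False
--
--     # At least one 'a' and 'b', and equal counts
--     if count_a > 0 and count_b > 0 and count_a == count_b:
--         return True
--     else:
--         return False
-- ===== SOURCE B (Python) =====
-- def is_in_language_L(string):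
--     n = len(string) // 2
--     return len(string) % 2 == 0 and len(string) > 0 and string == "a" * n + "b" * n
-- ===== Notes on version B (the rewrite author's own statement) =====
-- stated objective: simpler
-- what changed: Replaces the character-counting loop with its seen_b flag and early returns by a direct structural check: length even and positive, and the string equals the canonical a-block followed by the equal-size b-block built by string repetition.
import Mathlib
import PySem

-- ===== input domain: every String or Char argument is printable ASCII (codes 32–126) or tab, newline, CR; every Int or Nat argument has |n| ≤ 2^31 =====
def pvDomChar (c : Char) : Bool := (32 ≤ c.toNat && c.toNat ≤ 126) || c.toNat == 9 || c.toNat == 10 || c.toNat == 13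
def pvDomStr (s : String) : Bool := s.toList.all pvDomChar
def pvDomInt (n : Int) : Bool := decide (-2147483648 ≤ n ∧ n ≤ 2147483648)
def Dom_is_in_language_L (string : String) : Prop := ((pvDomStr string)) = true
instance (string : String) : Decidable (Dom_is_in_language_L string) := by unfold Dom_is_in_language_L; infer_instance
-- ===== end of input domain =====

-- B replaces A's counting loop (count_a/count_b/seen_b with early returns) by a direct structural
-- check: length even and positive and the string equals the canonical a-block then b-block. Same asymptotics, simpler.

-- ===== PORT A =====
-- A's for-loop: state (count_a, count_b, seen_b), early return False on 'a' after 'b' or on other chars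
def pvLoopA : List Char → Nat → Nat → Bool → Bool
  | [], ca, cb, _ => decide (0 < ca) && decide (0 < cb) && decide (ca = cb)
  | c :: rest, ca, cb, sb =>
    if c = 'a' then
      if sb then false else pvLoopA rest (ca + 1) cb sb
    else if c = 'b' then
      pvLoopA rest ca (cb + 1) true
    else false

def is_in_language_L (string : String) : Bool :=
  pvLoopA string.toList 0 0 false

-- ===== PORT B =====
def is_in_language_L_alt (string : String) : Bool :=
  let l := string.toList
  let n := l.length / 2
  decide (l.length % 2 = 0) && decide (0 < l.length) &&
    decide (l = List.replicate n 'a' ++ List.replicate n 'b')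

-- ===== PRECONDITION & SPEC =====
def Spec_is_in_language_L (string : String) (out : Bool) : Prop := out = is_in_language_L_alt string
instance (string : String) (out : Bool) : Decidable (Spec_is_in_language_L string out) := by unfold Spec_is_in_language_L; infer_instance

-- ===== CLAIM (what is proved, stated in full; the proofs are below) =====
def Claim_equal_is_in_language_L : Prop := ∀ (string : String), Dom_is_in_language_L string → Spec_is_in_language_L string (is_in_language_L string)

-- ===== LEMMAS AND PROOFS =====

lemma pvLoopA_true (cs : List Char) : ∀ ca cb : Nat,
    pvLoopA cs ca cb true = true ↔
      cs = List.replicate cs.length 'b' ∧ 0 < ca ∧ 0 < cb + cs.length ∧ ca = cb + cs.length := by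
  induction cs with
  | nil => intro ca cb; simp [pvLoopA]; omega
  | cons c rest ih =>
    intro ca cb
    by_cases hc : c = 'a'
    · subst hc
      simp only [pvLoopA, if_pos trivial]
      constructor
      · intro h; cases h
      · rintro ⟨h1, -⟩
        simp [List.replicate_succ] at h1
    · by_cases hb : c = 'b'
      · subst hb
        simp only [pvLoopA, if_neg hc, if_pos trivial, ih]
        simp only [List.length_cons, List.replicate_succ, List.cons.injEq, true_and]
        constructor
        · rintro ⟨h1, h2, h3, h4⟩
          exact ⟨h1, h2, by omega, by omega⟩
        · rintro ⟨h1, h2, h3, h4⟩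
          exact ⟨h1, h2, by omega, by omega⟩
      · simp only [pvLoopA, if_neg hc, if_neg hb]
        constructor
        · intro h; cases h
        · rintro ⟨h1, -⟩
          simp [List.replicate_succ] at h1
          exact (hb h1.1).elim

lemma pvLoopA_false (cs : List Char) : ∀ ca : Nat,
    pvLoopA cs ca 0 false = true ↔
      ∃ p q : Nat, cs = List.replicate p 'a' ++ List.replicate q 'b' ∧
        0 < ca + p ∧ 0 < q ∧ ca + p = q := by
  induction cs with
  | nil =>
    intro ca; simp only [pvLoopA]
    constructor
    · intro h; simp at h
    · rintro ⟨p, q, h1, h2, h3, h4⟩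
      have := congrArg List.length h1
      simp at this
      omega
  | cons c rest ih =>
    intro ca
    by_cases hc : c = 'a'
    · subst hc
      simp only [pvLoopA, if_pos trivial, if_neg (by simp : ¬ (false = true)), ih (ca + 1)]
      constructor
      · rintro ⟨p, q, h1, h2, h3, h4⟩
        exact ⟨p + 1, q, by simp [List.replicate_succ, h1], by omega, h3, by omega⟩
      · rintro ⟨p, q, h1, h2, h3, h4⟩
        cases p with
        | zero =>
          exfalso
          cases q with
          | zero => omega
          | succ q' => simp [List.replicate_succ] at h1
        | succ p' =>
          refine ⟨p', q, ?_, by omega, h3, by omega⟩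
          rw [List.replicate_succ] at h1
          simpa using h1
    · by_cases hb : c = 'b'
      · subst hb
        simp only [pvLoopA, if_neg hc, if_pos trivial, pvLoopA_true]
        constructor
        · rintro ⟨h1, h2, h3, h4⟩
          refine ⟨0, rest.length + 1, ?_, by omega, by omega, by omega⟩
          simp [List.replicate_succ]
          exact h1
        · rintro ⟨p, q, h1, h2, h3, h4⟩
          cases p with
          | zero =>
            cases q with
            | zero => omega
            | succ q' =>
              simp [List.replicate_succ] at h1
              have hlen : rest.length = q' := by
                have := congrArg List.length h1; simpa using this
              exact ⟨by rw [hlen]; exact h1, by omega, by omega, by omega⟩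
          | succ p' => simp [List.replicate_succ] at h1
      · simp only [pvLoopA, if_neg hc, if_neg hb]
        constructor
        · intro h; cases h
        · rintro ⟨p, q, h1, h2, h3, h4⟩
          cases p with
          | zero =>
            cases q with
            | zero => omega
            | succ q' =>
              simp [List.replicate_succ] at h1
              exact (hb h1.1).elim
          | succ p' =>
            simp [List.replicate_succ] at h1
            exact (hc h1.1).elim

-- the a^p b^q characterisation, rephrased as B computes it (n = length/2)
lemma exists_form_iff (l : List Char) :
    (∃ p q : Nat, l = List.replicate p 'a' ++ List.replicate q 'b' ∧
        0 < 0 + p ∧ 0 < q ∧ 0 + p = q) ↔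
      (l.length % 2 = 0 ∧ 0 < l.length ∧
        l = List.replicate (l.length / 2) 'a' ++ List.replicate (l.length / 2) 'b') := by
  constructor
  · rintro ⟨p, q, h1, h2, h3, h4⟩
    have hpq : p = q := by omega
    subst hpq
    have hlen : l.length = 2 * p := by
      have := congrArg List.length h1; simp at this; omega
    have hhalf : l.length / 2 = p := by omega
    exact ⟨by omega, by omega, by rw [hhalf]; exact h1⟩
  · rintro ⟨h1, h2, h3⟩
    exact ⟨l.length / 2, l.length / 2, h3, by omega, by omega, by omega⟩

-- ===== VERDICT (by name: the statement is the Claim_ definition above) =====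
theorem is_in_language_L_spec : Claim_equal_is_in_language_L := by
  intro s _
  unfold Spec_is_in_language_L is_in_language_L is_in_language_L_alt
  have h := (pvLoopA_false s.toList 0).trans (exists_form_iff s.toList)
  rw [Bool.eq_iff_iff]
  simpa [Bool.and_eq_true, decide_eq_true_iff, and_assoc] using h
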